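-- pv_equiv track=rewrite | github.com/jhwa426/Python | COMPSCI 130/Laboratory/Week07/Lab 10.py | get_max_len_list
-- ===== SOURCE A (Python) =====
-- def get_max_len_list(words):
--     if len(words) == 1:
--         return len(words[0])
--
--     else:
--         first_word = len(words[0])
--         rest_word = get_max_len_list(words[1:])
--
--         if first_word > rest_word:
--             return first_word
--         else:
--             return rest_word
-- ===== SOURCE B (Python) =====
-- def get_max_len_list(words):
--     best = len(words[0])
--     for w in words[1:]:
--         if len(w) > best:
--             best = len(w)
--     return best
-- ===== Notes on version B (the rewrite author's own statement) =====
-- stated objective: faster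
-- what changed: Replaced the recursion over list slices with a single flat iterative pass keeping a running maximum seeded from the first word.
import Mathlib
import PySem

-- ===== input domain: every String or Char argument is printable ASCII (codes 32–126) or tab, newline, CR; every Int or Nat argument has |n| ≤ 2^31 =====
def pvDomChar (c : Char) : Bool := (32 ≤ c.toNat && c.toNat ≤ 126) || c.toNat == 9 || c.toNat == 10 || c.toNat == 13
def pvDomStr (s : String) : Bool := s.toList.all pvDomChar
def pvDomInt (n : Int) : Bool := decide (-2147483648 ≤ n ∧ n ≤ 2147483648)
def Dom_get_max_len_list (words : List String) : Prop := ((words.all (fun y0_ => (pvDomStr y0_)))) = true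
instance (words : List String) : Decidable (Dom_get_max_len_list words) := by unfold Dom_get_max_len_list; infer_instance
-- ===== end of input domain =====

-- B replaces A's recursion over list slices with one flat iterative pass keeping a running maximum (simpler).


-- ===== PORT A =====
-- recursion on the list structure: words[1:] is the tail; [] is excluded by Pre_ (Python raises IndexError there)
def get_max_len_list (words : List String) : Int :=
  match words with
  | [] => 0  -- unreachable under Pre_get_max_len_list (Python: IndexError)
  | [w] => PySem.Str.len w
  | w :: rest =>
      let first_word := PySem.Str.len w
      let rest_word := get_max_len_list rest
      if first_word > rest_word then first_word else rest_word

-- ===== PORT B =====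
def get_max_len_list_alt (words : List String) : Int :=
  match words with
  | [] => 0  -- unreachable under Pre_get_max_len_list (Python: IndexError)
  | w :: rest =>
      rest.foldl (fun best x => if PySem.Str.len x > best then PySem.Str.len x else best)
        (PySem.Str.len w)

-- ===== PRECONDITION & SPEC =====
-- Pre_ excludes the empty list, on which Python A raises IndexError (words[0]).
def Pre_get_max_len_list (words : List String) : Prop := words ≠ []
instance (words : List String) : Decidable (Pre_get_max_len_list words) := by unfold Pre_get_max_len_list; infer_instance
def pvWitness_get_max_len_list : List String := ["ab", "cde", "f"]
def Spec_get_max_len_list (words : List String) (out : Int) : Prop := out = get_max_len_list_alt words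
instance (words : List String) (out : Int) : Decidable (Spec_get_max_len_list words out) := by unfold Spec_get_max_len_list; infer_instance

-- ===== CLAIM (what is proved, stated in full; the proofs are below) =====
def Claim_equal_get_max_len_list : Prop := ∀ (words : List String), Dom_get_max_len_list words → Pre_get_max_len_list words → Spec_get_max_len_list words (get_max_len_list words)

-- ===== LEMMAS AND PROOFS =====
-- loop invariant: the fold over the tail computes "accumulator vs. A's max of the tail"
theorem foldl_best_eq (rs : List String) (h : rs ≠ []) : ∀ (b : Int),
    rs.foldl (fun best x => if PySem.Str.len x > best then PySem.Str.len x else best) b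
      = if b > get_max_len_list rs then b else get_max_len_list rs := by
  induction rs with
  | nil => exact absurd rfl h
  | cons x rs' ih =>
    intro b
    cases rs' with
    | nil =>
      simp only [List.foldl, get_max_len_list]
      split_ifs <;> omega
    | cons y ys =>
      simp only [List.foldl] at *
      rw [ih (by simp) _]
      simp only [get_max_len_list]
      split_ifs <;> omega

theorem get_max_len_list_spec : Claim_equal_get_max_len_list := by
  intro words _ hpre
  unfold Spec_get_max_len_list
  cases words with
  | nil => exact absurd rfl hpre
  | cons w rest =>
    cases rest with
    | nil => simp [get_max_len_list, get_max_len_list_alt]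
    | cons y ys =>
      simp only [get_max_len_list_alt]
      rw [foldl_best_eq (y :: ys) (by simp)]
      rfl
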